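-- pv_equiv track=rewrite | github.com/markokristian/aoc2023 | 14/1.py | matrix_pressure
-- ===== SOURCE A (Python) =====
-- def pressure(line):
--     return sum([
--         len(line) - i
--         for i, char in enumerate(line) if char == 'O'
--     ])
--
-- def matrix_pressure(matrix):
--     p = 0
--     for k in range(len(matrix)):
--         s = "".join(matrix[k])
--         parts = s.split('#')
--         for i in range(len(parts)):
--             zeros = parts[i].count('O')
--             dots = parts[i].count('.')
--             parts[i] = 'O' * zeros + '.' * dots
--         p += pressure('#'.join(parts))
--     return p
-- ===== SOURCE B (Python) =====
-- def matrix_pressure(matrix):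
--     # Closed-form per-segment load: no packed-string rebuilding or re-scanning (alternative decomposition).
--     total = 0
--     for row in matrix:
--         counts = [(part.count('O'), part.count('.'))
--                   for part in "".join(row).split('#')]
--         L = sum(z + d for z, d in counts) + len(counts) - 1
--         off = 0
--         for z, d in counts:
--             total += z * L - z * off - z * (z - 1) // 2
--             off += z + d + 1
--     return total
-- ===== Notes on version B (the rewrite author's own statement) =====
-- stated objective: alternative
-- what changed: Instead of rebuilding each packed segment string, rejoining with '#' and re-scanning the whole line for O positions, B counts O/. per segment once and adds each segment's load in closed form z*L - z*off - z*(z-1)//2 while tracking the running offset.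
import Mathlib
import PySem

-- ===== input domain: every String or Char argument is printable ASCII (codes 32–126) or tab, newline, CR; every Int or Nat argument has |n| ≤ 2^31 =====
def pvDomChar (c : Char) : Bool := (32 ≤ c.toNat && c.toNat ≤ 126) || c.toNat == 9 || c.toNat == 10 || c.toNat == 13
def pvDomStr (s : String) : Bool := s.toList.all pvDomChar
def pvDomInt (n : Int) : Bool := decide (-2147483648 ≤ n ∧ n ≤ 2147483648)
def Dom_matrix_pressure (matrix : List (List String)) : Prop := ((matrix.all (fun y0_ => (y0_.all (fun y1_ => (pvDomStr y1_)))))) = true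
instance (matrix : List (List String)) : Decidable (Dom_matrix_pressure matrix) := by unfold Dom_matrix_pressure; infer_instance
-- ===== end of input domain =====

-- B replaces A's pack-rejoin-and-rescan per row with a closed-form per-segment load (alternative decomposition, same cost).

-- ===== PORT A =====
-- pressure(line): sum(len(line) - i for i, char in enumerate(line) if char == 'O')
def pvPressure (line : List Char) : Int :=
  (((PySem.List.enumerate line 0).filter (fun p => p.2 == 'O')).map
    (fun p => (PySem.Chars.len line : Int) - p.1)).sum

-- 'for k in range(len(matrix))' reading only matrix[k] = left-to-right fold over matrix;
-- the in-place index loop 'parts[i] = ...' rebuilds each element independently = elementwise map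
def matrix_pressure (matrix : List (List String)) : Int :=
  matrix.foldl (fun p row =>
    let s := PySem.Chars.join [] (row.map String.toList)           -- "".join(matrix[k])
    let parts := PySem.Chars.splitOn s ['#']                        -- s.split('#')
    let parts := parts.map (fun part =>
      List.replicate (PySem.Chars.count part ['O']) 'O' ++
      List.replicate (PySem.Chars.count part ['.']) '.')            -- 'O'*zeros + '.'*dots
    p + pvPressure (PySem.Chars.join ['#'] parts)) 0                -- p += pressure('#'.join(parts))

-- ===== PORT B =====
def matrix_pressure_alt (matrix : List (List String)) : Int :=
  matrix.foldl (fun total row =>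
    let counts := (PySem.Chars.splitOn (PySem.Chars.join [] (row.map String.toList)) ['#']).map
      (fun part => (PySem.Chars.count part ['O'], PySem.Chars.count part ['.']))
    let L : Int := (counts.map (fun zd => (zd.1 : Int) + zd.2)).sum + counts.length - 1
    (counts.foldl (fun (acc : Int × Int) zd =>
      let z : Int := zd.1
      (acc.1 + z * L - z * acc.2 - PySem.Int.floordiv (z * (z - 1)) 2,
       acc.2 + z + (zd.2 : Int) + 1)) (total, 0)).1) 0

-- ===== PRECONDITION & SPEC =====
def Spec_matrix_pressure (matrix : List (List String)) (out : Int) : Prop := out = matrix_pressure_alt matrix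
instance (matrix : List (List String)) (out : Int) : Decidable (Spec_matrix_pressure matrix out) := by unfold Spec_matrix_pressure; infer_instance

-- ===== CLAIM (what is proved, stated in full; the proofs are below) =====
def Claim_equal_matrix_pressure : Prop := ∀ (matrix : List (List String)), Dom_matrix_pressure matrix → Spec_matrix_pressure matrix (matrix_pressure matrix)

-- ===== LEMMAS AND PROOFS =====

-- weighted load of an enumerated fragment, measured against a fixed full length L
def pvF (L : Int) (ps : List (Int × Char)) : Int :=
  ((ps.filter (fun p => p.2 == 'O')).map (fun p => L - p.1)).sum

def pvPack (zd : Nat × Nat) : List Char :=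
  List.replicate zd.1 'O' ++ List.replicate zd.2 '.'

theorem pvPressure_eq_pvF (line : List Char) :
    pvPressure line = pvF (line.length : Int) (PySem.List.enumerate line 0) := by
  simp [pvPressure, pvF, PySem.Chars.len]

theorem pvF_append (L : Int) (a b : List (Int × Char)) :
    pvF L (a ++ b) = pvF L a + pvF L b := by simp [pvF]

theorem pvF_Os (L : Int) (z : Nat) (s : Int) :
    pvF L (PySem.List.enumerate (List.replicate z 'O') s)
      = z * L - z * s - ((Finset.range z).sum (fun j => (j : Int))) := by
  induction z generalizing s with
  | zero => simp [pvF]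
  | succ n ih =>
    rw [List.replicate_succ, PySem.List.enumerate_cons]
    have h := ih (s + 1)
    simp only [pvF, List.filter_cons] at h ⊢
    norm_num
    rw [h, Finset.sum_range_succ]
    ring

theorem pvF_non_O (L : Int) (c : Char) (hc : c ≠ 'O') (d : Nat) (s : Int) :
    pvF L (PySem.List.enumerate (List.replicate d c) s) = 0 := by
  induction d generalizing s with
  | zero => simp [pvF]
  | succ n ih =>
    rw [List.replicate_succ, PySem.List.enumerate_cons]
    simp [pvF, hc] at *
    exact ih _

-- gauss: the index sum is B's z*(z-1)//2
theorem pv_gauss (z : Nat) :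
    ((Finset.range z).sum (fun j => (j : Int)))
      = PySem.Int.floordiv ((z : Int) * ((z : Int) - 1)) 2 := by
  have h1 : ((z : Int) * ((z : Int) - 1)) = ((z * (z - 1) : Nat) : Int) := by
    cases z with
    | zero => simp
    | succ n => push_cast; ring
  rw [h1, show ((2 : Int) = ((2 : Nat) : Int)) from rfl, PySem.Int.floordiv_natCast]
  rw [← Nat.cast_sum, Finset.sum_range_id]

theorem pvF_pack (L : Int) (zd : Nat × Nat) (s : Int) :
    pvF L (PySem.List.enumerate (pvPack zd) s)
      = zd.1 * L - zd.1 * s - PySem.Int.floordiv ((zd.1 : Int) * ((zd.1 : Int) - 1)) 2 := by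
  rw [pvPack, PySem.List.enumerate_append, pvF_append, pvF_Os,
    pvF_non_O L '.' (by decide), ← pv_gauss]
  ring

-- the central lemma: B's fold computes the pressure of the '#'-joined packed segments
theorem pv_main (L : Int) (counts : List (Nat × Nat)) (t s : Int) :
    (counts.foldl (fun (acc : Int × Int) zd =>
      let z : Int := zd.1
      (acc.1 + z * L - z * acc.2 - PySem.Int.floordiv (z * (z - 1)) 2,
       acc.2 + z + (zd.2 : Int) + 1)) (t, s)).1
    = t + pvF L (PySem.List.enumerate (PySem.Chars.join ['#'] (counts.map pvPack)) s) := by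
  induction counts generalizing t s with
  | nil => simp [pvF, PySem.Chars.join, List.intercalate]
  | cons zd rest ih =>
    cases rest with
    | nil =>
      simp only [List.map_cons, List.map_nil, List.foldl_cons, List.foldl_nil,
        PySem.Chars.join, List.intercalate]
      rw [show (List.intersperse ['#'] [pvPack zd]).flatten = pvPack zd from by simp, pvF_pack]
      ring
    | cons y r =>
      have hj : PySem.Chars.join ['#'] ((zd :: y :: r).map pvPack)
          = pvPack zd ++ (['#'] ++ PySem.Chars.join ['#'] ((y :: r).map pvPack)) := by
        simp [PySem.Chars.join, List.intercalate]
      rw [List.foldl_cons]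
      rw [ih, hj, PySem.List.enumerate_append, PySem.List.enumerate_append,
        pvF_append, pvF_append, pvF_pack]
      have hh : pvF L (PySem.List.enumerate ['#'] (s + ((pvPack zd).length : Int))) = 0 := by
        simp [pvF, PySem.List.enumerate_cons, PySem.List.enumerate_nil]
      rw [hh]
      have hoff : s + ((pvPack zd).length : Int) + ((['#'] : List Char).length : Int)
          = s + (zd.1 : Int) + (zd.2 : Int) + 1 := by
        simp [pvPack]; ring
      rw [hoff]
      ring

theorem pv_splitOn_go_ne_nil (sep : List Char) (fuel : Nat) (l cur : List Char)
    (acc : List (List Char)) : PySem.Chars.splitOn.go sep fuel l cur acc ≠ [] := by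
  induction fuel generalizing l cur acc with
  | zero => simp [PySem.Chars.splitOn.go]
  | succ n ih =>
    cases l with
    | nil => simp [PySem.Chars.splitOn.go]
    | cons c rest =>
      rw [PySem.Chars.splitOn.go]
      split
      · exact ih _ _ _
      · exact ih _ _ _

theorem pv_splitOn_ne_nil (s sep : List Char) : PySem.Chars.splitOn s sep ≠ [] := by
  unfold PySem.Chars.splitOn; exact pv_splitOn_go_ne_nil _ _ _ _ _

-- length of the '#'-rejoined packed line, in Int form (needs a nonempty parts list)
theorem pv_join_length (packs : List (List Char)) (h : packs ≠ []) :
    ((PySem.Chars.join ['#'] packs).length : Int)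
      = (packs.map (fun p => (p.length : Int))).sum + packs.length - 1 := by
  induction packs with
  | nil => exact absurd rfl h
  | cons x rest ih =>
    cases rest with
    | nil => simp [PySem.Chars.join, List.intercalate]
    | cons y r =>
      have hj : PySem.Chars.join ['#'] (x :: y :: r)
          = x ++ (['#'] ++ PySem.Chars.join ['#'] (y :: r)) := by
        simp [PySem.Chars.join, List.intercalate]
      have h2 := ih (by simp)
      rw [hj]
      simp only [List.length_append, List.map_cons, List.sum_cons, List.length_cons, List.length_nil] at h2 ⊢
      push_cast at h2 ⊢
      omega

-- per-row equality of the two step functions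
theorem pv_row (row : List String) (t : Int) :
    (let counts := (PySem.Chars.splitOn (PySem.Chars.join [] (row.map String.toList)) ['#']).map
        (fun part => (PySem.Chars.count part ['O'], PySem.Chars.count part ['.']))
     let L : Int := (counts.map (fun zd => (zd.1 : Int) + zd.2)).sum + counts.length - 1
     (counts.foldl (fun (acc : Int × Int) zd =>
       let z : Int := zd.1
       (acc.1 + z * L - z * acc.2 - PySem.Int.floordiv (z * (z - 1)) 2,
        acc.2 + z + (zd.2 : Int) + 1)) (t, 0)).1)
    = t + pvPressure (PySem.Chars.join ['#']
        ((PySem.Chars.splitOn (PySem.Chars.join [] (row.map String.toList)) ['#']).map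
          (fun part =>
            List.replicate (PySem.Chars.count part ['O']) 'O' ++
            List.replicate (PySem.Chars.count part ['.']) '.'))) := by
  set parts := PySem.Chars.splitOn (PySem.Chars.join [] (row.map String.toList)) ['#'] with hparts
  have hne : parts ≠ [] := pv_splitOn_ne_nil _ _
  have hmap : (parts.map (fun part =>
      (PySem.Chars.count part ['O'], PySem.Chars.count part ['.']))).map pvPack
      = parts.map (fun part =>
          List.replicate (PySem.Chars.count part ['O']) 'O' ++
          List.replicate (PySem.Chars.count part ['.']) '.') := by
    rw [List.map_map]; rfl
  simp only []
  rw [pv_main, hmap, pvPressure_eq_pvF]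
  congr 1
  rw [pv_join_length _ (by simpa using hne)]
  simp only [List.map_map, List.length_map]
  have hm : (List.map ((fun zd => ((zd.1 : Int) + (zd.2 : Int))) ∘ fun part =>
        (PySem.Chars.count part ['O'], PySem.Chars.count part ['.'])) parts)
      = List.map ((fun p => ((p.length : Int))) ∘ fun part =>
          List.replicate (PySem.Chars.count part ['O']) 'O' ++
          List.replicate (PySem.Chars.count part ['.']) '.') parts :=
    List.map_congr_left (fun part _ => by simp)
  rw [hm]

-- both ports fold the same per-row value over the rows
theorem pv_fold_eq (matrix : List (List String)) (p : Int) :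
    matrix.foldl (fun p row =>
      let s := PySem.Chars.join [] (row.map String.toList)
      let parts := PySem.Chars.splitOn s ['#']
      let parts := parts.map (fun part =>
        List.replicate (PySem.Chars.count part ['O']) 'O' ++
        List.replicate (PySem.Chars.count part ['.']) '.')
      p + pvPressure (PySem.Chars.join ['#'] parts)) p
    = matrix.foldl (fun total row =>
      let counts := (PySem.Chars.splitOn (PySem.Chars.join [] (row.map String.toList)) ['#']).map
        (fun part => (PySem.Chars.count part ['O'], PySem.Chars.count part ['.']))
      let L : Int := (counts.map (fun zd => (zd.1 : Int) + zd.2)).sum + counts.length - 1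
      (counts.foldl (fun (acc : Int × Int) zd =>
        let z : Int := zd.1
        (acc.1 + z * L - z * acc.2 - PySem.Int.floordiv (z * (z - 1)) 2,
         acc.2 + z + (zd.2 : Int) + 1)) (total, 0)).1) p := by
  induction matrix generalizing p with
  | nil => rfl
  | cons row rest ih =>
    simp only [List.foldl_cons]
    rw [pv_row row p, ih]

-- ===== VERDICT (by name: the statement is the Claim_ definition above) =====
theorem matrix_pressure_spec : Claim_equal_matrix_pressure := by
  intro matrix _
  unfold Spec_matrix_pressure matrix_pressure matrix_pressure_alt
  exact pv_fold_eq matrix 0
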